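-- pv_equiv track=rewrite | github.com/AlexandraB-C/Cryptography_labs | lab1/lab_1.py | build_permuted_alphabet
-- ===== SOURCE A (Python) =====
-- def build_permuted_alphabet(perm_key):
--     # use set to avoid duplicates
--     seen = set()
--     perm = []
--     # add unique letters from key
--     for c in perm_key.upper():
--         if c not in seen:
--             perm.append(c)
--             seen.add(c)
--     # add remaining alphabet letters
--     for c in 'ABCDEFGHIJKLMNOPQRSTUVWXYZ':
--         if c not in seen:
--             perm.append(c)
--             seen.add(c)
--     return ''.join(perm)
-- ===== SOURCE B (Python) =====
-- def build_permuted_alphabet(perm_key):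
--     # recursive first-occurrence dedup: keep the head, delete its later copies, recurse
--     def uniq(chars):
--         if not chars:
--             return []
--         head = chars[0]
--         return [head] + uniq([x for x in chars[1:] if x != head])
--     key = perm_key.upper()
--     rest = [c for c in 'ABCDEFGHIJKLMNOPQRSTUVWXYZ' if c not in key]
--     return ''.join(uniq(list(key)) + rest)
-- ===== Notes on version B (the rewrite author's own statement) =====
-- stated objective: alternative
-- what changed: Replaces A's single seen-set-guarded append pass over key-then-alphabet by a recursive delete-and-recurse dedup of the key (keep head, remove its later copies, recurse) plus a separate filter of the fixed alphabet against the key, with no seen set at all.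
import Mathlib
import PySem

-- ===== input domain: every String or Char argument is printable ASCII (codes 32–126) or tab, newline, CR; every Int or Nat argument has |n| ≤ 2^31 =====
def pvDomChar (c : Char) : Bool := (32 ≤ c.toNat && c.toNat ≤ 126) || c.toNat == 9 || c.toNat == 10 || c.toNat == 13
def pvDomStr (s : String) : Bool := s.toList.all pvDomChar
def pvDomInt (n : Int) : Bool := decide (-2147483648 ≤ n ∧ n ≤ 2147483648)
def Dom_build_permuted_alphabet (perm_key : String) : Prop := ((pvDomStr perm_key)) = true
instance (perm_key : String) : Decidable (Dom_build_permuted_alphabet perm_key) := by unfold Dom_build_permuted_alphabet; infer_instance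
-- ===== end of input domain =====

-- B replaces A's seen-set-guarded append pass by a recursive delete-and-recurse dedup of
-- the key plus a filter of the fixed alphabet against the key (alternative decomposition).

-- ===== PORT A =====
-- loop body shared by A's two loops: append c and mark it seen unless already seen
def pvBuildStep (st : List Char × PySem.Set Char) (c : Char) : List Char × PySem.Set Char :=
  if PySem.Set.contains st.2 c then st else (st.1 ++ [c], PySem.Set.add st.2 c)

def build_permuted_alphabet (perm_key : String) : String :=
  let st1 := (PySem.Str.upper perm_key).toList.foldl pvBuildStep ([], PySem.Set.empty)
  let st2 := "ABCDEFGHIJKLMNOPQRSTUVWXYZ".toList.foldl pvBuildStep st1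
  String.ofList st2.1

-- ===== PORT B =====
-- uniq(chars): keep the head, delete its later copies, recurse
def pvUniq : List Char → List Char
  | [] => []
  | c :: t => c :: pvUniq (t.filter (fun x => x != c))
termination_by l => l.length
decreasing_by
  simp only [List.length_unattach, List.length_cons, Nat.lt_succ_iff]
  exact le_trans (List.length_filter_le _ _) (by simp)

def build_permuted_alphabet_alt (perm_key : String) : String :=
  let key := (PySem.Str.upper perm_key).toList
  let rest := "ABCDEFGHIJKLMNOPQRSTUVWXYZ".toList.filter (fun c => !key.contains c)
  String.ofList (pvUniq key ++ rest)

-- ===== PRECONDITION & SPEC =====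
def Spec_build_permuted_alphabet (perm_key : String) (out : String) : Prop := out = build_permuted_alphabet_alt perm_key
instance (perm_key : String) (out : String) : Decidable (Spec_build_permuted_alphabet perm_key out) := by unfold Spec_build_permuted_alphabet; infer_instance

-- ===== CLAIM (what is proved, stated in full; the proofs are below) =====
def Claim_equal_build_permuted_alphabet : Prop := ∀ (perm_key : String), Dom_build_permuted_alphabet perm_key → Spec_build_permuted_alphabet perm_key (build_permuted_alphabet perm_key)

-- ===== LEMMAS AND PROOFS =====

theorem pvUniq_nil : pvUniq [] = [] := by rw [pvUniq]

theorem pvUniq_cons (c : Char) (t : List Char) :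
    pvUniq (c :: t) = c :: pvUniq (t.filter (fun x => x != c)) := by
  rw [pvUniq]

-- A's fold keeps perm and seen equal as lists, both folding Set.add
theorem pvBuildStep_foldl (l : List Char) (s : PySem.Set Char) :
    l.foldl pvBuildStep (s, s) = (l.foldl PySem.Set.add s, l.foldl PySem.Set.add s) := by
  induction l generalizing s with
  | nil => rfl
  | cons c t ih =>
    simp only [List.foldl_cons]
    have hstep : pvBuildStep (s, s) c = (PySem.Set.add s c, PySem.Set.add s c) := by
      by_cases h : c ∈ s <;> simp [pvBuildStep, PySem.Set.add, PySem.Set.contains, h]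
    rw [hstep, ih]

-- folding Set.add from s appends the recursive dedup of the not-yet-seen elements
theorem foldl_add_eq_append_pvUniq (l : List Char) (s : List Char) :
    l.foldl PySem.Set.add s = s ++ pvUniq (l.filter (fun x => !s.contains x)) := by
  induction l generalizing s with
  | nil => simp [pvUniq_nil]
  | cons c t ih =>
    by_cases h : c ∈ s
    · have hc : (!s.contains c) = false := by simp [h]
      simp only [List.foldl_cons, List.filter_cons, hc, Bool.false_eq_true,
        if_false]
      rw [show PySem.Set.add s c = s by simp [PySem.Set.add, h]]
      exact ih s
    · have hc : (!s.contains c) = true := by simp [h]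
      simp only [List.foldl_cons, List.filter_cons, hc, if_true]
      rw [show PySem.Set.add s c = s ++ [c] by simp [PySem.Set.add, h]]
      rw [ih (s ++ [c])]
      rw [pvUniq_cons]
      have hfil : t.filter (fun x => !(s ++ [c]).contains x)
          = (t.filter (fun x => !s.contains x)).filter (fun x => x != c) := by
        rw [List.filter_filter]
        apply List.filter_congr
        intro x _
        by_cases hx : x = c <;> by_cases hs : x ∈ s <;> simp [hx, hs]
      rw [hfil, List.append_assoc, List.singleton_append]

theorem mem_pvUniq_aux (n : Nat) : ∀ (l : List Char), l.length ≤ n → ∀ (x : Char), (x ∈ pvUniq l ↔ x ∈ l) := by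
  induction n with
  | zero =>
    intro l hl x
    rw [List.length_eq_zero_iff.mp (Nat.le_zero.mp hl)]
    simp [pvUniq_nil]
  | succ n ih =>
    intro l hl x
    match l with
    | [] => simp [pvUniq_nil]
    | c :: t =>
      rw [pvUniq_cons]
      have ht : (t.filter (fun x => x != c)).length ≤ n :=
        Nat.le_of_lt_succ (Nat.lt_of_le_of_lt (List.length_filter_le _ _)
          (by simpa using hl))
      by_cases hx : x = c
      · simp [hx]
      · simp [hx, ih _ ht x, List.mem_filter]

theorem mem_pvUniq (l : List Char) (x : Char) : x ∈ pvUniq l ↔ x ∈ l :=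
  mem_pvUniq_aux l.length l le_rfl x

theorem pvUniq_of_nodup_aux (n : Nat) : ∀ (l : List Char), l.length ≤ n → l.Nodup → pvUniq l = l := by
  induction n with
  | zero =>
    intro l hl _
    rw [List.length_eq_zero_iff.mp (Nat.le_zero.mp hl)]
    simp [pvUniq_nil]
  | succ n ih =>
    intro l hl h
    match l with
    | [] => simp [pvUniq_nil]
    | c :: t =>
      rw [pvUniq_cons]
      have hc : c ∉ t := (List.nodup_cons.mp h).1
      have hfil : t.filter (fun x => x != c) = t :=
        List.filter_eq_self.mpr (fun x hx => by
          simp [show x ≠ c from fun he => hc (he ▸ hx)])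
      rw [hfil, ih t (Nat.le_of_succ_le_succ (by simpa using hl)) (List.nodup_cons.mp h).2]

theorem pvUniq_of_nodup (l : List Char) (h : l.Nodup) : pvUniq l = l :=
  pvUniq_of_nodup_aux l.length l le_rfl h

theorem alpha_nodup : ("ABCDEFGHIJKLMNOPQRSTUVWXYZ".toList).Nodup := by decide

-- ===== VERDICT (by name: the statement is the Claim_ definition above) =====
theorem build_permuted_alphabet_spec : Claim_equal_build_permuted_alphabet := by
  intro perm_key _
  unfold Spec_build_permuted_alphabet build_permuted_alphabet build_permuted_alphabet_alt
  have hkeyfold : ((PySem.Str.upper perm_key).toList).foldl pvBuildStep ([], PySem.Set.empty)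
      = (((PySem.Str.upper perm_key).toList).foldl PySem.Set.add [],
         ((PySem.Str.upper perm_key).toList).foldl PySem.Set.add []) := by
    have := pvBuildStep_foldl ((PySem.Str.upper perm_key).toList) ([] : PySem.Set Char)
    simpa [PySem.Set.empty] using this
  simp only [hkeyfold, pvBuildStep_foldl]
  refine congrArg String.ofList ?_
  rw [foldl_add_eq_append_pvUniq, foldl_add_eq_append_pvUniq]
  simp only [List.contains_nil, Bool.not_false, List.filter_true, List.nil_append]
  congr 1
  have hfil : ("ABCDEFGHIJKLMNOPQRSTUVWXYZ".toList).filter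
        (fun x => !(pvUniq ((PySem.Str.upper perm_key).toList)).contains x)
      = ("ABCDEFGHIJKLMNOPQRSTUVWXYZ".toList).filter
        (fun c => !((PySem.Str.upper perm_key).toList).contains c) := by
    apply List.filter_congr
    intro x _
    simp [List.contains_eq_mem, mem_pvUniq]
  rw [hfil]
  exact pvUniq_of_nodup _ (List.Nodup.filter _ alpha_nodup)
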